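-- pv_equiv track=rewrite | github.com/danula-ded/Test_SRE-week | A/code.py | find_peak_time
-- ===== SOURCE A (Python) =====
-- def find_peak_time(n, sessions):
--     events = []
--
--     for s, f in sessions:
--         events.append((s, 'start'))
--         events.append((f, 'end'))
--
--     # Сортируем события: по времени, затем 'end' идут после 'start'
--     events.sort(key=lambda x: (x[0], x[1] == 'end'))
--
--     max_count = 0
--     current_count = 0
--     best_time = 0
--
--     for time, event in events:
--         if event == 'start':
--             current_count += 1
--             if current_count > max_count:
--                 max_count = current_count
--                 best_time = time
--         else:
--             current_count -= 1
--
--     return best_time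
-- ===== SOURCE B (Python) =====
-- def find_peak_time(n, sessions):
--     # Candidate-scan: concurrency at time t = sessions started by t minus sessions
--     # finished strictly before t; take the earliest start time with a strictly new max.
--     best_time = 0
--     best_count = 0
--     for t in sorted(s for s, _ in sessions):
--         c = sum(1 for s, _ in sessions if s <= t) - sum(1 for _, f in sessions if f < t)
--         if c > best_count:
--             best_count = c
--             best_time = t
--     return best_time
-- ===== Notes on version B (the rewrite author's own statement) =====
-- stated objective: alternative
-- what changed: Replaced A's build-and-sort event list with a sweep carrying (max,current,best) state by a candidate scan: for each start time in sorted order compute the concurrency directly as (#sessions started <= t) - (#sessions finished < t) and keep the first time with a strictly new maximum.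
import Mathlib
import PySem

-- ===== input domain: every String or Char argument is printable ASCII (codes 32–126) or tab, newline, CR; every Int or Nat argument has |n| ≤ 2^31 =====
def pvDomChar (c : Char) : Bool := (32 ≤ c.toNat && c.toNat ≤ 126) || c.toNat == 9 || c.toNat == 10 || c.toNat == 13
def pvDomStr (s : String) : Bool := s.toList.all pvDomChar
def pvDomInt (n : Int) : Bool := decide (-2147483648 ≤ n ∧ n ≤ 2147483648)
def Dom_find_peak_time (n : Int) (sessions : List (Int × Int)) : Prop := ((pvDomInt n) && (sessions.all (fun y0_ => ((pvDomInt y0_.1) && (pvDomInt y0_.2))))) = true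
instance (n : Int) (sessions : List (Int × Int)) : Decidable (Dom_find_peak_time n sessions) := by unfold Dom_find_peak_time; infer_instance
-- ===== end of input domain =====

-- B replaces A's event-sort-and-sweep by a direct candidate scan over the sorted start
-- times (alternative decomposition, not faster: O(n^2) vs A's O(n log n)).

-- ===== PORT A =====
-- loop body of A's sweep over the sorted events, state (max_count, current_count, best_time)
def stepA (st : Int × Int × Int) (te : Int × String) : Int × Int × Int :=
  if te.2 == "start" then
    let current := st.2.1 + 1
    if current > st.1 then (current, current, te.1) else (st.1, current, st.2.2)
  else
    (st.1, st.2.1 - 1, st.2.2)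

def find_peak_time (n : Int) (sessions : List (Int × Int)) : Int :=
  let events := sessions.foldl
    (fun acc sf => (acc ++ [(sf.1, "start")]) ++ [(sf.2, "end")]) ([] : List (Int × String))
  let events := PySem.List.sorted2 events (fun x => x.1) (fun x => x.2 == "end")
  let st := events.foldl stepA (0, 0, 0)
  st.2.2

-- ===== PORT B =====
-- concurrency at time t: sessions started by t minus sessions finished strictly before t
def concurrentAt (sessions : List (Int × Int)) (t : Int) : Int :=
  ((sessions.countP fun sf => decide (sf.1 ≤ t)) : Int)
    - ((sessions.countP fun sf => decide (sf.2 < t)) : Int)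

def find_peak_time_alt (n : Int) (sessions : List (Int × Int)) : Int :=
  let ts := PySem.List.sorted (sessions.map fun sf => sf.1) (fun t => t) false
  let st := ts.foldl
    (fun (st : Int × Int) t =>
      let c := concurrentAt sessions t
      if c > st.2 then (t, c) else st) (0, 0)
  st.1

-- ===== PRECONDITION & SPEC =====
def Spec_find_peak_time (n : Int) (sessions : List (Int × Int)) (out : Int) : Prop := out = find_peak_time_alt n sessions
instance (n : Int) (sessions : List (Int × Int)) (out : Int) : Decidable (Spec_find_peak_time n sessions out) := by unfold Spec_find_peak_time; infer_instance

-- ===== CLAIM (what is proved, stated in full; the proofs are below) =====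
def Claim_equal_find_peak_time : Prop := ∀ (n : Int) (sessions : List (Int × Int)), Dom_find_peak_time n sessions → Spec_find_peak_time n sessions (find_peak_time n sessions)

-- ===== LEMMAS AND PROOFS =====

-- the comparison sorted2 uses for A's key (time, event == 'end')
def bef (a b : Int × String) : Bool :=
  decide (a.1 < b.1) || (!decide (b.1 < a.1) && decide ((a.2 == "end") < (b.2 == "end")))

-- "a may legitimately precede b" in the sorted event list
def RB (a b : Int × String) : Prop := bef b a = false

-- times of the start events, in order
def startsTimes (E : List (Int × String)) : List Int :=
  (E.filter fun e => e.2 == "start").map Prod.fst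

-- counts over the event list: starts no later than t / ends strictly before t
def cS (E : List (Int × String)) (t : Int) : Nat :=
  E.countP fun e => e.2 == "start" && decide (e.1 ≤ t)
def cF (E : List (Int × String)) (t : Int) : Nat :=
  E.countP fun e => !(e.2 == "start") && decide (e.1 < t)

lemma bef_asym (a b : Int × String) (h : bef a b = true) : bef b a = false := by
  rcases a with ⟨a1, a2⟩; rcases b with ⟨b1, b2⟩
  simp only [bef, Bool.lt_iff] at *
  cases hx : (a2 == "end") <;> cases hy : (b2 == "end") <;>
    simp_all <;> omega

lemma bef_trans (a b c : Int × String) (h1 : bef a b = true) (h2 : bef b c = true) :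
    bef a c = true := by
  rcases a with ⟨a1, a2⟩; rcases b with ⟨b1, b2⟩; rcases c with ⟨c1, c2⟩
  simp only [bef, Bool.lt_iff] at *
  cases hx : (a2 == "end") <;> cases hy : (b2 == "end") <;> cases hz : (c2 == "end") <;>
    simp_all <;> omega

lemma RB_not_lt (a b : Int × String) (h : RB a b) : ¬ b.1 < a.1 := by
  simp only [RB, bef, Bool.or_eq_false_iff, decide_eq_false_iff_not] at h
  exact h.1

lemma pairwise_insertBy (x : Int × String) (ys : List (Int × String))
    (h : ys.Pairwise RB) : (PySem.List.insertBy bef x ys).Pairwise RB := by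
  induction ys with
  | nil => simp [PySem.List.insertBy]
  | cons y ys ih =>
    rw [List.pairwise_cons] at h
    by_cases hxy : bef x y = true
    · rw [show PySem.List.insertBy bef x (y :: ys) = x :: y :: ys by
        simp [PySem.List.insertBy, hxy]]
      refine List.Pairwise.cons ?_ (List.Pairwise.cons h.1 h.2)
      intro z hz
      rcases List.mem_cons.mp hz with rfl | hz
      · exact bef_asym x z hxy
      · -- RB x z: if bef z x then bef z y by transitivity, contradicting RB y z
        by_contra hc
        have hzx : bef z x = true := by
          cases hb : bef z x with
          | true => rfl
          | false => exact absurd hb hc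
        have hyz : bef z y = false := h.1 z hz
        simp [bef_trans z x y hzx hxy] at hyz
    · rw [show PySem.List.insertBy bef x (y :: ys) = y :: PySem.List.insertBy bef x ys by
        simp [PySem.List.insertBy, hxy]]
      refine List.Pairwise.cons ?_ (ih h.2)
      intro z hz
      rcases (PySem.List.mem_insertBy bef x z ys).mp hz with rfl | hz
      · simpa [RB] using hxy
      · exact h.1 z hz

lemma pairwise_foldl_insertBy (l : List (Int × String)) :
    ∀ acc : List (Int × String), acc.Pairwise RB →
      (l.foldl (fun acc x => PySem.List.insertBy bef x acc) acc).Pairwise RB := by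
  induction l with
  | nil => intro acc h; simpa using h
  | cons x l ih =>
    intro acc h
    exact ih _ (pairwise_insertBy x acc h)

lemma sorted2_pairwise (E0 : List (Int × String)) :
    (PySem.List.sorted2 E0 (fun x => x.1) (fun x => x.2 == "end") false).Pairwise RB := by
  have : PySem.List.sorted2 E0 (fun x => x.1) (fun x => x.2 == "end") false
      = E0.foldl (fun acc x => PySem.List.insertBy bef x acc) [] := rfl
  rw [this]
  exact pairwise_foldl_insertBy E0 [] (by simp)

-- A's raw event list, written as a flatMap
lemma rawEvents_eq (sessions : List (Int × Int)) :
    ∀ acc : List (Int × String),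
      sessions.foldl (fun acc sf => (acc ++ [(sf.1, "start")]) ++ [(sf.2, "end")]) acc
        = acc ++ sessions.flatMap (fun sf => [(sf.1, "start"), (sf.2, "end")]) := by
  induction sessions with
  | nil => intro acc; simp
  | cons sf l ih =>
    intro acc
    simp [List.foldl_cons, List.append_assoc, List.flatMap_def]

lemma raw_filter_starts (sessions : List (Int × Int)) :
    (sessions.flatMap (fun sf => [(sf.1, "start"), (sf.2, "end")])).filter
        (fun e => e.2 == "start")
      = sessions.map (fun sf => (sf.1, ("start" : String))) := by
  induction sessions with
  | nil => rfl
  | cons sf l ih => simp [List.filter, ih]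

lemma raw_cS (sessions : List (Int × Int)) (t : Int) :
    cS (sessions.flatMap (fun sf => [(sf.1, "start"), (sf.2, "end")])) t
      = sessions.countP (fun sf => decide (sf.1 ≤ t)) := by
  induction sessions with
  | nil => rfl
  | cons sf l ih => simp [cS, List.countP_cons] at *; omega

lemma raw_cF (sessions : List (Int × Int)) (t : Int) :
    cF (sessions.flatMap (fun sf => [(sf.1, "start"), (sf.2, "end")])) t
      = sessions.countP (fun sf => decide (sf.2 < t)) := by
  induction sessions with
  | nil => rfl
  | cons sf l ih => simp [cF, List.countP_cons] at *; omega

lemma raw_kinds (sessions : List (Int × Int)) :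
    ∀ e ∈ sessions.flatMap (fun sf => [(sf.1, "start"), (sf.2, "end")]),
      e.2 = "start" ∨ e.2 = "end" := by
  intro e he
  rcases List.mem_flatMap.mp he with ⟨sf, -, h⟩
  simp only [List.mem_cons, List.not_mem_nil, or_false] at h
  rcases h with rfl | rfl
  · left; rfl
  · right; rfl

-- ===== the core sweep lemma =====
lemma sweep_eq (c : Int → Int) :
    ∀ (E : List (Int × String)), E.Pairwise RB →
      (∀ e ∈ E, e.2 = "start" ∨ e.2 = "end") →
      ∀ (mx cur bt : Int),
      (∀ t ∈ startsTimes E, c t = cur + (cS E t : Int) - (cF E t : Int)) →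
      (E.foldl stepA (mx, cur, bt)).2.2
        = ((startsTimes E).foldl
            (fun st t => if c t > st.2 then (t, c t) else st) (bt, mx)).1 := by
  intro E
  induction E with
  | nil => intro _ _ mx cur bt _; simp [startsTimes]
  | cons e E' ih =>
    rcases e with ⟨u, ev⟩
    intro hPW hK mx cur bt hc
    rw [List.pairwise_cons] at hPW
    obtain ⟨hHd, hPW'⟩ := hPW
    have hK' : ∀ e ∈ E', e.2 = "start" ∨ e.2 = "end" := fun e he => hK e (List.mem_cons_of_mem _ he)
    -- every event in E' has time ≥ u
    have hGe : ∀ e ∈ E', ¬ e.1 < u := fun e he => RB_not_lt _ _ (hHd e he)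
    by_cases hev : (ev == "start") = true
    · -- start event at time u
      have hevS : ev = "start" := by simpa using hev
      subst hevS
      have hST : startsTimes ((u, "start") :: E') = u :: startsTimes E' := by
        simp [startsTimes, List.filter]
      -- every start time of E' is ≥ u
      have hGeS : ∀ t ∈ startsTimes E', u ≤ t := by
        intro t ht
        rcases List.mem_map.mp ht with ⟨e, he, rfl⟩
        have := hGe e (List.mem_of_mem_filter he)
        omega
      -- counts over E vs E' at a start time t ≥ u
      have hcS : ∀ t, u ≤ t → (cS ((u, "start") :: E') t : Int) = 1 + cS E' t := by
        intro t ht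
        simp [cS, ht]
        omega
      have hcF : ∀ t, cF ((u, "start") :: E') t = cF E' t := by
        intro t; simp [cF]
      -- hypothesis transferred to E' with current_count + 1
      have hc' : ∀ t ∈ startsTimes E', c t = (cur + 1) + (cS E' t : Int) - (cF E' t : Int) := by
        intro t ht
        have h1 := hc t (by rw [hST]; exact List.mem_cons_of_mem _ ht)
        rw [hcS t (hGeS t ht), hcF t] at h1
        omega
      -- value of c at u
      have hFu : cF ((u, "start") :: E') u = 0 := by
        unfold cF
        refine List.countP_eq_zero.mpr ?_
        intro e he
        rcases List.mem_cons.mp he with rfl | he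
        · simp
        · simp only [Bool.and_eq_true, decide_eq_true_eq, Bool.not_eq_eq_eq_not, not_and]
          intro _
          simpa using hGe e he
      have hcu : c u = cur + 1 + (cS E' u : Int) := by
        have h1 := hc u (by rw [hST]; exact List.mem_cons_self)
        rw [hcS u le_rfl, hFu] at h1
        omega
      -- unfold one step on each side
      rw [hST]
      have hstep : stepA (mx, cur, bt) (u, "start")
          = if cur + 1 > mx then (cur + 1, cur + 1, u) else (mx, cur + 1, bt) := by
        simp only [stepA]
        split <;> rfl
      rw [List.foldl_cons, List.foldl_cons, hstep]
      -- A's state after the step, as B's (best_time, best_count) pair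
      by_cases hd : cS E' u = 0
      · -- no further start at time u: c u = cur + 1 and the two states coincide
        have hcu' : c u = cur + 1 := by rw [hcu, hd]; simp
        by_cases hgt : cur + 1 > mx
        · rw [if_pos hgt, if_pos (by rw [hcu']; exact hgt)]
          rw [ih hPW' hK' (cur + 1) (cur + 1) u hc']
          rw [hcu']
        · rw [if_neg hgt, if_neg (by rw [hcu']; exact hgt)]
          exact ih hPW' hK' mx (cur + 1) bt hc'
      · -- further starts at time u exist: the head of startsTimes E' is u, and one
        -- more step brings both states together
        have hdpos : 0 < cS E' u := Nat.pos_of_ne_zero hd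
        have humem : u ∈ startsTimes E' := by
          rcases List.countP_pos_iff.mp hdpos with ⟨e, he, hpe⟩
          simp only [Bool.and_eq_true, decide_eq_true_eq] at hpe
          have : e.1 = u := by have := hGe e he; omega
          exact List.mem_map.mpr ⟨e, List.mem_filter.mpr ⟨he, hpe.1⟩, this⟩
        obtain ⟨h0, S'', hS⟩ : ∃ h0 S'', startsTimes E' = h0 :: S'' := by
          cases hS : startsTimes E' with
          | nil => rw [hS] at humem; cases humem
          | cons h0 S'' => exact ⟨h0, S'', rfl⟩
        have hsorted : (startsTimes E').Pairwise (· ≤ ·) := by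
          refine List.Pairwise.map _ ?_ (List.Pairwise.filter _ hPW')
          intro a b hab
          have := RB_not_lt a b hab
          omega
        have hh0 : h0 = u := by
          have h1 : u ≤ h0 := hGeS h0 (by rw [hS]; exact List.mem_cons_self)
          rcases List.mem_cons.mp (by rw [← hS]; exact humem) with h | h
          · omega
          · have : h0 ≤ u := by
              rw [hS, List.pairwise_cons] at hsorted
              exact hsorted.1 u h
            omega
        subst hh0
        -- c h0 = c u ≥ cur + 2: one more fold step merges the two states
        have hd1 : (1 : Int) ≤ (cS E' h0 : Int) := by exact_mod_cast hdpos
        by_cases hg2 : cur + 1 > mx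
        · rw [if_pos hg2, ih hPW' hK' (cur + 1) (cur + 1) h0 hc', hS,
            List.foldl_cons, List.foldl_cons]
          congr 1
          dsimp only
          split_ifs <;> first | rfl | (exfalso; omega)
        · rw [if_neg hg2, ih hPW' hK' mx (cur + 1) bt hc', hS,
            List.foldl_cons, List.foldl_cons]
          congr 1
          dsimp only
          split_ifs <;> rfl
    · -- end event at time u
      have hevE : ev = "end" := by
        rcases hK (u, ev) List.mem_cons_self with h | h
        · have h' : ev = "start" := h
          exact absurd (by simp [h']) hev
        · exact h
      subst hevE
      have hST : startsTimes ((u, "end") :: E') = startsTimes E' := by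
        simp [startsTimes, List.filter]
      -- every start time of E' is > u ('end' sorts after 'start' at equal times)
      have hGtS : ∀ t ∈ startsTimes E', u < t := by
        intro t ht
        rcases List.mem_map.mp ht with ⟨e, he, rfl⟩
        have heS : e.2 = "start" := by
          have := (List.mem_filter.mp he).2; simpa using this
        have hrb := hHd e (List.mem_of_mem_filter he)
        simp only [RB, bef, Bool.or_eq_false_iff, Bool.and_eq_false_iff,
          decide_eq_false_iff_not, Bool.not_eq_eq_eq_not, heS] at hrb
        rcases hrb with ⟨h1, h2 | h2⟩
        · simpa using h2
        · exact absurd h2 (by simp [Bool.lt_iff])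
      have hc' : ∀ t ∈ startsTimes E', c t = (cur - 1) + (cS E' t : Int) - (cF E' t : Int) := by
        intro t ht
        have h1 := hc t (by rw [hST]; exact ht)
        have hlt : u < t := hGtS t ht
        have hcSe : cS ((u, "end") :: E') t = cS E' t := by
          simp [cS]
        have hcFe : (cF ((u, "end") :: E') t : Int) = 1 + cF E' t := by
          simp [cF, hlt]
          omega
        rw [hcSe, hcFe] at h1
        omega
      have hstep : stepA (mx, cur, bt) (u, "end") = (mx, cur - 1, bt) := by
        simp [stepA]
      rw [List.foldl_cons, hstep, hST]
      exact ih hPW' hK' mx (cur - 1) bt hc'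

-- ===== assembling the two ports =====
theorem find_peak_time_eq_alt (n : Int) (sessions : List (Int × Int)) :
    find_peak_time n sessions = find_peak_time_alt n sessions := by
  unfold find_peak_time find_peak_time_alt
  simp only [rawEvents_eq sessions [], List.nil_append]
  set E0 := sessions.flatMap (fun sf => [(sf.1, "start"), (sf.2, "end")]) with hE0
  set E := PySem.List.sorted2 E0 (fun x => x.1) (fun x => x.2 == "end") false with hE
  have hPerm : E.Perm E0 := PySem.List.sorted2_perm E0 _ _ false
  have hPW : E.Pairwise RB := sorted2_pairwise E0
  have hK : ∀ e ∈ E, e.2 = "start" ∨ e.2 = "end" := fun e he =>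
    raw_kinds sessions e (hPerm.mem_iff.mp he)
  -- B's sorted start-time list is exactly the start times of the sorted event list
  have hts : PySem.List.sorted (sessions.map fun sf => sf.1) (fun t => t) false
      = startsTimes E := by
    apply PySem.List.sorted_id_eq_of_perm_of_pairwise
    · -- permutation
      have h1 : (E.filter fun e => e.2 == "start").Perm
          (E0.filter fun e => e.2 == "start") := hPerm.filter _
      have h2 := h1.map Prod.fst
      rw [raw_filter_starts sessions] at h2
      unfold startsTimes
      refine h2.trans ?_
      rw [List.map_map]
      exact List.Perm.refl _
    · -- sortedness
      refine List.Pairwise.map _ ?_ (List.Pairwise.filter _ hPW)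
      intro a b hab
      have := RB_not_lt a b hab
      omega
  -- counts over the sorted events equal counts over the sessions
  have hcS : ∀ t, cS E t = sessions.countP (fun sf => decide (sf.1 ≤ t)) := by
    intro t
    unfold cS
    rw [hPerm.countP_eq]
    exact raw_cS sessions t
  have hcF : ∀ t, cF E t = sessions.countP (fun sf => decide (sf.2 < t)) := by
    intro t
    unfold cF
    rw [hPerm.countP_eq]
    exact raw_cF sessions t
  have hmain := sweep_eq (concurrentAt sessions) E hPW hK 0 0 0
    (by
      intro t _
      unfold concurrentAt
      rw [hcS t, hcF t]
      omega)
  rw [hts]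
  exact hmain

-- ===== VERDICT (by name: the statement is the Claim_ definition above) =====
theorem find_peak_time_spec : Claim_equal_find_peak_time := by
  intro n sessions _
  unfold Spec_find_peak_time
  exact find_peak_time_eq_alt n sessions
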